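-- pv_equiv track=rewrite | github.com/sjmsjyw/DRAM | mag_annotator/summarize_vgfs.py | get_strand_switches
-- ===== SOURCE A (Python) =====
-- def get_strand_switches(strandedness):
--     switches = 0
--     strand = strandedness[0]
--     for i in range(len(strandedness)):
--         if strandedness[i] != strand:
--             switches += 1
--             strand = strandedness[i]
--     return switches
-- ===== SOURCE B (Python) =====
-- def get_strand_switches(strandedness):
--     def switches_in(lo, hi):
--         # number of adjacent strand switches within strandedness[lo:hi]
--         if hi - lo < 2:
--             return 0
--         mid = (lo + hi) // 2
--         return (switches_in(lo, mid) + switches_in(mid, hi)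
--                 + (strandedness[mid - 1] != strandedness[mid]))
--     return switches_in(0, len(strandedness))
-- ===== Notes on version B (the rewrite author's own statement) =====
-- stated objective: alternative
-- what changed: B counts switches by divide-and-conquer on the index range (switches(lo,hi) = switches(lo,mid) + switches(mid,hi) + [s[mid-1] != s[mid]]) instead of A's single left-to-right scan with a maintained previous-strand variable; Pre_ excludes only the empty list, on which A raises IndexError.
import Mathlib
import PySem

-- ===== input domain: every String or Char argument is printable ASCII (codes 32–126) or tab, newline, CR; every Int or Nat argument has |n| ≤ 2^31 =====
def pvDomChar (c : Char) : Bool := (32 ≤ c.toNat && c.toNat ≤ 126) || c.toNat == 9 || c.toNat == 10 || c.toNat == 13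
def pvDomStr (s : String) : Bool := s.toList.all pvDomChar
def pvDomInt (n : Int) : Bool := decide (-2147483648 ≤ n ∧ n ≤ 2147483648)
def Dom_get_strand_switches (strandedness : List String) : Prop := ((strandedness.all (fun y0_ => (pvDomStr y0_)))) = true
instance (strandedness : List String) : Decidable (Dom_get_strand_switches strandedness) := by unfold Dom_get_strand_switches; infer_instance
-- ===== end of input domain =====

-- B counts switches by divide-and-conquer on the index range instead of a left-to-right scan (alternative algorithm, same cost).
-- ===== PORT A =====
-- A: loop over indices, comparing each element to the maintained previous strand.
def get_strand_switches (strandedness : List String) : Int :=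
  match strandedness with
  | [] => 0  -- Python raises IndexError at strandedness[0]; excluded by Pre_
  | s0 :: _ =>
    (strandedness.foldl
      (fun (st : Int × String) x => if x ≠ st.2 then (st.1 + 1, x) else st)
      (0, s0)).1

-- ===== PORT B =====
-- B: switches_in(lo, hi) = switches in strandedness[lo:hi], by splitting the range at its midpoint.
def pvSwitchesIn (xs : List String) (lo hi : Int) : Int :=
  if hi - lo < 2 then 0
  else
    let mid := PySem.Int.floordiv (lo + hi) 2
    pvSwitchesIn xs lo mid + pvSwitchesIn xs mid hi +
      (if PySem.List.pyGet? xs (mid - 1) ≠ PySem.List.pyGet? xs mid then 1 else 0)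
termination_by (hi - lo).toNat
decreasing_by
  all_goals
    have hb := (PySem.Int.floordiv_eq_iff_of_pos
      (a := lo + hi) (b := 2) (q := PySem.Int.floordiv (lo + hi) 2) (by norm_num)).mp rfl
    omega

def get_strand_switches_alt (strandedness : List String) : Int :=
  pvSwitchesIn strandedness 0 strandedness.length

-- ===== PRECONDITION & SPEC =====
-- Pre_ excludes only the empty list, on which A raises IndexError.
def Pre_get_strand_switches (strandedness : List String) : Prop := strandedness ≠ []
instance (strandedness : List String) : Decidable (Pre_get_strand_switches strandedness) := by unfold Pre_get_strand_switches; infer_instance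
def pvWitness_get_strand_switches : List String := ["+", "-", "-"]

def Spec_get_strand_switches (strandedness : List String) (out : Int) : Prop := out = get_strand_switches_alt strandedness
instance (strandedness : List String) (out : Int) : Decidable (Spec_get_strand_switches strandedness out) := by unfold Spec_get_strand_switches; infer_instance

-- ===== CLAIM (what is proved, stated in full; the proofs are below) =====
def Claim_equal_get_strand_switches : Prop := ∀ (strandedness : List String), Dom_get_strand_switches strandedness → Pre_get_strand_switches strandedness → Spec_get_strand_switches strandedness (get_strand_switches strandedness)

-- ===== LEMMAS AND PROOFS =====
-- dsw xs i: 1 if the strand switches between positions i-1 and i, else 0 (used for i ≥ 1).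
def pvDsw (xs : List String) (i : ℕ) : Int := if xs[i-1]? ≠ xs[i]? then 1 else 0

-- adjacency count used to characterise A's fold
def pvAdj : String → List String → Int
  | _, [] => 0
  | p, y :: ys => (if y ≠ p then 1 else 0) + pvAdj y ys

theorem pvFold_eq_adj (l : List String) : ∀ (acc : Int) (p : String),
    (l.foldl (fun (st : Int × String) x => if x ≠ st.2 then (st.1 + 1, x) else st) (acc, p)).1
      = acc + pvAdj p l := by
  induction l with
  | nil => intro acc p; simp [pvAdj]
  | cons y ys ih =>
    intro acc p
    rw [List.foldl_cons]
    show (List.foldl _ (if y ≠ p then (acc + 1, y) else (acc, p)) ys).1 = _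
    by_cases h : y = p
    · rw [if_neg (by simp [h]), ih, pvAdj, if_neg (by simp [h]), h]; ring
    · rw [if_pos h, ih, pvAdj, if_pos h]; ring

theorem pvAdj_eq_sum (xs : List String) : ∀ (n lo : ℕ), xs.length ≤ lo + 1 + n → lo < xs.length →
    pvAdj (xs.getD lo "") (xs.drop (lo + 1)) = ∑ i ∈ Finset.Ico (lo + 1) xs.length, pvDsw xs i := by
  intro n
  induction n with
  | zero =>
    intro lo h1 h2
    rw [List.drop_eq_nil_of_le (by omega), Finset.Ico_eq_empty (by omega), Finset.sum_empty]
    rfl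
  | succ n ih =>
    intro lo h1 h2
    by_cases hlt : lo + 1 < xs.length
    · rw [List.drop_eq_getElem_cons hlt]
      show (if xs[lo+1] ≠ xs.getD lo "" then (1:Int) else 0) + pvAdj xs[lo+1] (xs.drop (lo+1+1)) = _
      rw [Finset.sum_eq_sum_Ico_succ_bot (by omega)]
      have hgd : xs.getD (lo+1) "" = xs[lo+1] := List.getD_eq_getElem xs "" hlt
      have := ih (lo+1) (by omega) hlt
      rw [hgd] at this
      rw [this]
      congr 1
      unfold pvDsw
      simp only [Nat.add_sub_cancel, List.getElem?_eq_getElem h2, List.getElem?_eq_getElem hlt,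
        List.getD_eq_getElem xs "" h2]
      by_cases h : xs[lo+1] = xs[lo]
      · rw [if_neg (not_not_intro h), if_neg (not_not_intro (by rw [h]))]
      · rw [if_pos h, if_pos (by simpa using Ne.symm h)]
    · rw [List.drop_eq_nil_of_le (by omega), Finset.Ico_eq_empty (by omega), Finset.sum_empty]
      rfl

theorem pvSwitchesIn_eq (xs : List String) : ∀ (n lo hi : ℕ), hi - lo ≤ n →
    pvSwitchesIn xs lo hi = ∑ i ∈ Finset.Ico (lo + 1) hi, pvDsw xs i := by
  intro n
  induction n with
  | zero =>
    intro lo hi h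
    rw [pvSwitchesIn, if_pos (by omega), Finset.Ico_eq_empty (by omega), Finset.sum_empty]
  | succ n ih =>
    intro lo hi h
    rw [pvSwitchesIn]
    by_cases hs : (hi : Int) - lo < 2
    · rw [if_pos hs, Finset.Ico_eq_empty (by omega), Finset.sum_empty]
    · rw [if_neg hs]
      have hcast : ((lo : Int) + hi) = ((lo + hi : ℕ) : Int) := by push_cast; ring
      have hm : PySem.Int.floordiv ((lo : Int) + hi) 2 = (((lo + hi) / 2 : ℕ) : Int) := by
        rw [hcast]; exact_mod_cast PySem.Int.floordiv_natCast (lo + hi) 2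
      set m : ℕ := (lo + hi) / 2 with hmdef
      have hb1 : lo + 1 ≤ m := by omega
      have hb2 : m + 1 ≤ hi := by omega
      simp only [hm]
      rw [ih lo m (by omega), ih m hi (by omega)]
      have hm1 : ((m : Int) - 1) = ((m - 1 : ℕ) : Int) := by omega
      rw [hm1, PySem.List.pyGet?_natCast, PySem.List.pyGet?_natCast]
      have hpeel : ∑ i ∈ Finset.Ico m hi, pvDsw xs i
          = pvDsw xs m + ∑ i ∈ Finset.Ico (m + 1) hi, pvDsw xs i :=
        Finset.sum_eq_sum_Ico_succ_bot (by omega) _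
      have hcat : (∑ i ∈ Finset.Ico (lo + 1) m, pvDsw xs i) + ∑ i ∈ Finset.Ico m hi, pvDsw xs i
          = ∑ i ∈ Finset.Ico (lo + 1) hi, pvDsw xs i :=
        Finset.sum_Ico_consecutive _ (by omega) (by omega)
      rw [← hcat, hpeel]
      unfold pvDsw
      ring

-- ===== VERDICT (by name: the statement is the Claim_ definition above) =====
theorem get_strand_switches_spec : Claim_equal_get_strand_switches := by
  intro s _ hpre
  unfold Spec_get_strand_switches get_strand_switches get_strand_switches_alt
  match s with
  | [] => exact absurd rfl hpre
  | x :: l =>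
    simp only [List.foldl]
    rw [if_neg (by simp), pvFold_eq_adj]
    have hA : pvAdj x l = ∑ i ∈ Finset.Ico 1 (x :: l).length, pvDsw (x :: l) i := by
      have := pvAdj_eq_sum (x :: l) (x :: l).length 0 (by omega) (by simp)
      simpa using this
    have hB : pvSwitchesIn (x :: l) 0 ((x :: l).length : Int)
        = ∑ i ∈ Finset.Ico 1 (x :: l).length, pvDsw (x :: l) i := by
      have := pvSwitchesIn_eq (x :: l) (x :: l).length 0 (x :: l).length (by omega)
      simpa using this
    rw [hA, hB]
    ring
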